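-- pv_equiv track=rewrite | github.com/tsests/homework_assignments | 3_prac/prac5.py | is_contain_three_words_in_a_row
-- ===== SOURCE A (Python) =====
-- def is_contain_three_words_in_a_row(text_data:str):
--     words = text_data.split(' ')
--     string_count:int = 0
--     true_flag = False
--
--     for word in words:
--         if word.isdecimal() == False:
--             string_count += 1
--             if string_count >= 3:
--                 true_flag = True
--                 break
--         else:
--             string_count = 0
--
--     return true_flag
-- ===== SOURCE B (Python) =====
-- def is_contain_three_words_in_a_row(text_data: str):
--     words = text_data.split(' ')
--     return any(not a.isdecimal() and not b.isdecimal() and not c.isdecimal()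
--                for a, b, c in zip(words, words[1:], words[2:]))
-- ===== Notes on version B (the rewrite author's own statement) =====
-- stated objective: idiomatic
-- what changed: Replaces the stateful reset-counter loop with a declarative sliding-window scan: any() over zip of consecutive word triples.
import Mathlib
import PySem

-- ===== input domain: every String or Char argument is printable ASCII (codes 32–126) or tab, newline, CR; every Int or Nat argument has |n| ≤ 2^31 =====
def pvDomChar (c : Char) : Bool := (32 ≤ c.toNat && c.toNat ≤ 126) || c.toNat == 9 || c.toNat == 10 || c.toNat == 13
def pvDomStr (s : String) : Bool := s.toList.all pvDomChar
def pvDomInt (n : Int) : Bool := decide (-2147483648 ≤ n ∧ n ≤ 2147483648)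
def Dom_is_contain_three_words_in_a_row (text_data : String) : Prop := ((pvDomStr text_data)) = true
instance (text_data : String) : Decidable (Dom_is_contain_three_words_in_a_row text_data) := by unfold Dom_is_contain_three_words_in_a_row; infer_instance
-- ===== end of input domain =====

-- B replaces A's stateful reset-counter loop with a sliding-window scan over consecutive
-- word triples (idiomatic; same cost). text.split(' ') is ported as PySem.Chars.splitOn
-- on the code points (the definition behind Str.split?, which is always `some` for the
-- nonempty separator " "); word.isdecimal() is ported as PySem.Chars.strIsdigit, exact on
-- the printable-ASCII domain (both hold iff the word is nonempty and all chars are '0'-'9').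

-- ===== PORT A =====
-- the for-loop of A: state = string_count; `break` + return of true_flag modelled by returning early
def pvALoop : List (List Char) → Int → Bool
  | [], _ => false
  | w :: ws, c =>
    if (PySem.Chars.strIsdigit w) = false then
      if c + 1 ≥ 3 then true else pvALoop ws (c + 1)
    else pvALoop ws 0

def is_contain_three_words_in_a_row (text_data : String) : Bool :=
  pvALoop (PySem.Chars.splitOn text_data.toList [' ']) 0

-- ===== PORT B =====
-- any(...) over zip(words, words[1:], words[2:]): test each consecutive triple of words
def pvBLoop : List (List Char) → Bool
  | a :: b :: c :: rest =>
    ((!PySem.Chars.strIsdigit a) && (!PySem.Chars.strIsdigit b) && (!PySem.Chars.strIsdigit c))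
      || pvBLoop (b :: c :: rest)
  | _ => false

def is_contain_three_words_in_a_row_alt (text_data : String) : Bool :=
  pvBLoop (PySem.Chars.splitOn text_data.toList [' '])

-- ===== PRECONDITION & SPEC =====
def Spec_is_contain_three_words_in_a_row (text_data : String) (out : Bool) : Prop := out = is_contain_three_words_in_a_row_alt text_data
instance (text_data : String) (out : Bool) : Decidable (Spec_is_contain_three_words_in_a_row text_data out) := by unfold Spec_is_contain_three_words_in_a_row; infer_instance

-- ===== CLAIM (what is proved, stated in full; the proofs are below) =====
def Claim_equal_is_contain_three_words_in_a_row : Prop := ∀ (text_data : String), Dom_is_contain_three_words_in_a_row text_data → Spec_is_contain_three_words_in_a_row text_data (is_contain_three_words_in_a_row text_data)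

-- ===== LEMMAS AND PROOFS =====

-- "the first n words of ws exist and are all non-decimal"
def pvLead : Nat → List (List Char) → Bool
  | 0, _ => true
  | _ + 1, [] => false
  | n + 1, w :: ws => (!PySem.Chars.strIsdigit w) && pvLead n ws

theorem pvLead_two_one (ws : List (List Char)) (h : pvLead 2 ws = true) : pvLead 1 ws = true := by
  match ws with
  | [] => simp [pvLead] at h
  | a :: rest => simp [pvLead] at h ⊢; exact h.1

theorem pvBLoop_of_lead3 (ws : List (List Char)) (h : pvLead 3 ws = true) : pvBLoop ws = true := by
  match ws with
  | [] | [_] | [_, _] => simp [pvLead] at h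
  | a :: b :: c :: rest =>
    simp [pvLead] at h
    simp [pvBLoop, h.1, h.2.1, h.2.2]

-- absorption: a leading all-non-decimal triple is found by the window scan
theorem lead3_or_BLoop (ws : List (List Char)) :
    (pvLead 3 ws || pvBLoop ws) = pvBLoop ws := by
  cases h3 : pvLead 3 ws with
  | false => simp
  | true => simp [pvBLoop_of_lead3 ws h3]

-- unfolding B's window at a cons cell
theorem pvBLoop_cons (w : List Char) (ws : List (List Char)) :
    pvBLoop (w :: ws) = (((!PySem.Chars.strIsdigit w) && pvLead 2 ws) || pvBLoop ws) := by
  match ws with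
  | [] => simp [pvBLoop, pvLead]
  | [a] => simp [pvBLoop, pvLead]
  | a :: b :: rest => simp [pvBLoop, pvLead, Bool.and_assoc]

-- invariant of A's counter loop against B's window scan
theorem pvALoop_eq (ws : List (List Char)) :
    ∀ c : Int, (c = 0 ∨ c = 1 ∨ c = 2) →
      pvALoop ws c = (pvLead (3 - c).toNat ws || pvBLoop ws) := by
  induction ws with
  | nil =>
    intro c hc
    rcases hc with rfl | rfl | rfl <;> simp [pvALoop, pvLead, pvBLoop]
  | cons w ws ih =>
    intro c hc
    by_cases hd : PySem.Chars.strIsdigit w = true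
    · -- decimal word: A resets the counter; the window never matches a triple through w
      have h0 := ih 0 (Or.inl rfl)
      have hB : pvBLoop (w :: ws) = pvBLoop ws := by
        rw [pvBLoop_cons, hd]; simp
      have hA : pvALoop (w :: ws) c = pvALoop ws 0 := by
        simp [pvALoop, hd]
      rw [hA, hB, h0]
      have h00 : ((3 : Int) - 0).toNat = 3 := rfl
      rw [h00, lead3_or_BLoop]
      rcases hc with rfl | rfl | rfl <;>
        · rw [show pvLead ((3 : Int) - _).toNat (w :: ws) = false by simp [pvLead, hd]]
          simp
    · have hd' : PySem.Chars.strIsdigit w = false := by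
        cases h : PySem.Chars.strIsdigit w
        · rfl
        · exact absurd h hd
      rcases hc with rfl | rfl | rfl
      · -- c = 0
        have h1 := ih 1 (Or.inr (Or.inl rfl))
        have hA : pvALoop (w :: ws) 0 = pvALoop ws 1 := by
          simp [pvALoop, hd']
        rw [hA, h1, pvBLoop_cons, hd']
        rw [show ((3 : Int) - 0).toNat = 3 from rfl, show ((3 : Int) - 1).toNat = 2 from rfl]
        simp [pvLead, hd']
      · -- c = 1
        have h2 := ih 2 (Or.inr (Or.inr rfl))
        have hA : pvALoop (w :: ws) 1 = pvALoop ws 2 := by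
          simp [pvALoop, hd']
        rw [hA, h2, pvBLoop_cons, hd']
        rw [show ((3 : Int) - 1).toNat = 2 from rfl, show ((3 : Int) - 2).toNat = 1 from rfl]
        cases hl2 : pvLead 2 ws with
        | false => simp [pvLead, hd']
        | true => simp [pvLead, hd', pvLead_two_one ws hl2]
      · -- c = 2 : counter reaches 3, A returns true; the window sees w as head of a triple
        simp [pvALoop, hd', pvLead]

-- ===== VERDICT (by name: the statement is the Claim_ definition above) =====
theorem is_contain_three_words_in_a_row_spec : Claim_equal_is_contain_three_words_in_a_row := by
  intro text_data _
  show pvALoop (PySem.Chars.splitOn text_data.toList [' ']) 0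
      = pvBLoop (PySem.Chars.splitOn text_data.toList [' '])
  rw [pvALoop_eq _ 0 (Or.inl rfl), show ((3 : Int) - 0).toNat = 3 from rfl, lead3_or_BLoop]
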